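-- pv_equiv track=rewrite | github.com/anon-githubber/interpretable_graph_classifications | utilities/sparsity.py | get_significant_nodes_count
-- ===== SOURCE A (Python) =====
-- def is_important(score, importance_ranges):
--     for start, end in importance_ranges:
--         if start <= score <= end:
--             return True
--     return False
--
-- def get_significant_nodes_count(scores_list, importance_ranges):
--     res = []
--     for scores in scores_list:
--         count = 0
--         for score in scores:
--             if is_important(score, importance_ranges):
--                 count += 1
--         res.append(count)
--     return res
-- ===== SOURCE B (Python) =====
-- def get_significant_nodes_count(scores_list, importance_ranges):
--     # Merge the ranges once (sorted by start), then locate each score by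
--     # binary search in the merged, disjoint, start-sorted intervals.
--     merged = []
--     for s, e in sorted(importance_ranges, key=lambda r: r[0]):
--         if merged and s <= merged[-1][1]:
--             ps, pe = merged[-1]
--             merged[-1] = (ps, max(pe, e))
--         else:
--             merged.append((s, e))
--     res = []
--     for scores in scores_list:
--         count = 0
--         for x in scores:
--             # i = number of merged intervals whose start is <= x
--             lo, hi = 0, len(merged)
--             while lo < hi:
--                 mid = (lo + hi) // 2
--                 if merged[mid][0] <= x:
--                     lo = mid + 1
--                 else:
--                     hi = mid
--             if lo > 0 and x <= merged[lo - 1][1]: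
--                 count += 1
--         res.append(count)
--     return res
-- ===== Notes on version B (the rewrite author's own statement) =====
-- stated objective: faster
-- what changed: B merges the importance ranges once into disjoint start-sorted intervals and binary-searches each score against them, instead of scanning all ranges per score.
import Mathlib
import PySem

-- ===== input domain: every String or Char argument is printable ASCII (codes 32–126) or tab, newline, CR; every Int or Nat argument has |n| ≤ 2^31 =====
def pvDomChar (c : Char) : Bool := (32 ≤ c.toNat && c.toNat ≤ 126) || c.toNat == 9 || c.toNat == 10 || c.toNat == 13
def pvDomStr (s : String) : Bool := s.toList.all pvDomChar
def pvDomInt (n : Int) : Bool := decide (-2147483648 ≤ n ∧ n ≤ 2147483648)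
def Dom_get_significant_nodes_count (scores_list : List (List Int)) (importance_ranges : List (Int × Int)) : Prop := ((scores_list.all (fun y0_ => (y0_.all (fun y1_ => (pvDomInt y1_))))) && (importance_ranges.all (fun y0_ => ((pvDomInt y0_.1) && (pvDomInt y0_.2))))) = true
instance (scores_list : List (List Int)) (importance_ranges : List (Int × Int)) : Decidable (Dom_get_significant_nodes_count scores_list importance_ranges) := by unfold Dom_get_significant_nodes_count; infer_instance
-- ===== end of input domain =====

-- B replaces A's per-score linear scan of all ranges by one sort-and-merge of the
-- ranges followed by a binary search per score (objective: faster).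

-- ===== PORT A =====
def is_important (score : Int) (importance_ranges : List (Int × Int)) : Bool :=
  match importance_ranges with
  | [] => false
  | (s, e) :: rest => if s ≤ score ∧ score ≤ e then true else is_important score rest

def get_significant_nodes_count (scores_list : List (List Int)) (importance_ranges : List (Int × Int)) : List Int :=
  scores_list.foldl (fun res scores =>
    res ++ [scores.foldl (fun count score =>
      if is_important score importance_ranges then count + 1 else count) 0]) []

-- ===== PORT B =====
-- Python updates/appends at merged's LAST position; we keep the accumulator
-- reversed (newest interval first) and reverse once at the end.
def pvMergeStep (acc : List (Int × Int)) (p : Int × Int) : List (Int × Int) :=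
  match acc with
  | (ps, pe) :: rest => if p.1 ≤ pe then (ps, max pe p.2) :: rest else p :: (ps, pe) :: rest
  | [] => [p]

def pvMerge (rs : List (Int × Int)) : List (Int × Int) :=
  (rs.foldl pvMergeStep []).reverse

-- B's while-loop; indices are always in range on actual calls, getD only totalises.
def pvBsearch (merged : List (Int × Int)) (x : Int) (lo hi : Nat) : Nat :=
  if h : lo < hi then
    let mid := (lo + hi) / 2
    if (merged.getD mid (0, 0)).1 ≤ x then pvBsearch merged x (mid + 1) hi
    else pvBsearch merged x lo mid
  else lo
termination_by hi - lo
decreasing_by all_goals omega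

def get_significant_nodes_count_alt (scores_list : List (List Int)) (importance_ranges : List (Int × Int)) : List Int :=
  let merged := pvMerge (PySem.List.sorted importance_ranges (fun r => r.1) false)
  scores_list.foldl (fun res scores =>
    res ++ [scores.foldl (fun count x =>
      let lo := pvBsearch merged x 0 merged.length
      if 0 < lo ∧ x ≤ (merged.getD (lo - 1) (0, 0)).2 then count + 1 else count) 0]) []

-- ===== PRECONDITION & SPEC =====
def Spec_get_significant_nodes_count (scores_list : List (List Int)) (importance_ranges : List (Int × Int)) (out : List Int) : Prop := out = get_significant_nodes_count_alt scores_list importance_ranges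
instance (scores_list : List (List Int)) (importance_ranges : List (Int × Int)) (out : List Int) : Decidable (Spec_get_significant_nodes_count scores_list importance_ranges out) := by unfold Spec_get_significant_nodes_count; infer_instance

-- ===== CLAIM (what is proved, stated in full; the proofs are below) =====
def Claim_equal_get_significant_nodes_count : Prop := ∀ (scores_list : List (List Int)) (importance_ranges : List (Int × Int)), Dom_get_significant_nodes_count scores_list importance_ranges → Spec_get_significant_nodes_count scores_list importance_ranges (get_significant_nodes_count scores_list importance_ranges)

-- ===== LEMMAS AND PROOFS =====

-- A's helper answers: is x inside some range?
lemma is_important_iff (x : Int) (rs : List (Int × Int)) :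
    is_important x rs = true ↔ ∃ p ∈ rs, p.1 ≤ x ∧ x ≤ p.2 := by
  induction rs with
  | nil => simp [is_important]
  | cons p t ih =>
    obtain ⟨s, e⟩ := p
    by_cases h : s ≤ x ∧ x ≤ e <;> simp [is_important, h, ih]

-- recursive reformulation of the merge fold
def pvMergeRec : (Int × Int) → List (Int × Int) → List (Int × Int)
  | cur, [] => [cur]
  | cur, q :: rest =>
    if q.1 ≤ cur.2 then pvMergeRec (cur.1, max cur.2 q.2) rest
    else cur :: pvMergeRec q rest

lemma foldl_mergeStep_eq (rest : List (Int × Int)) :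
    ∀ (cur : Int × Int) (acc : List (Int × Int)),
      (rest.foldl pvMergeStep (cur :: acc)).reverse = acc.reverse ++ pvMergeRec cur rest := by
  induction rest with
  | nil => intro cur acc; simp [pvMergeRec]
  | cons q t ih =>
    intro cur acc
    obtain ⟨ps, pe⟩ := cur
    by_cases h : q.1 ≤ pe
    · simp only [List.foldl_cons, pvMergeStep, if_pos h, pvMergeRec, ih]
    · simp only [List.foldl_cons, pvMergeStep, if_neg h, pvMergeRec]
      rw [ih q ((ps, pe) :: acc)]
      simp

lemma pvMerge_cons (p : Int × Int) (rs : List (Int × Int)) :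
    pvMerge (p :: rs) = pvMergeRec p rs := by
  unfold pvMerge
  rw [List.foldl_cons, show pvMergeStep [] p = p :: [] from rfl, foldl_mergeStep_eq]
  simp

-- merging preserves "x lies in some interval" (input sorted by start)
lemma mem_pvMergeRec (x : Int) :
    ∀ (rest : List (Int × Int)) (cur : Int × Int),
      (cur :: rest).Pairwise (fun a b => a.1 ≤ b.1) →
      ((∃ p ∈ pvMergeRec cur rest, p.1 ≤ x ∧ x ≤ p.2) ↔ ∃ p ∈ cur :: rest, p.1 ≤ x ∧ x ≤ p.2) := by
  intro rest
  induction rest with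
  | nil => intro cur _; simp [pvMergeRec]
  | cons q t ih =>
    intro cur hs
    obtain ⟨cs, ce⟩ := cur
    obtain ⟨s, e⟩ := q
    rw [List.pairwise_cons] at hs
    have hcs : cs ≤ s := hs.1 (s, e) (by simp)
    have hrest : ∀ r ∈ t, cs ≤ r.1 := fun r hr => hs.1 r (by simp [hr])
    have hqt := hs.2
    rw [List.pairwise_cons] at hqt
    by_cases h : s ≤ ce
    · have hps : ((cs, max ce e) :: t).Pairwise (fun a b : Int × Int => a.1 ≤ b.1) := by
        rw [List.pairwise_cons]
        exact ⟨fun r hr => hrest r hr, hqt.2⟩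
      rw [pvMergeRec, if_pos h, ih _ hps]
      constructor
      · rintro ⟨p, hp, h1, h2⟩
        simp only [List.mem_cons] at hp
        rcases hp with hp | hp
        · subst hp
          simp only [List.mem_cons]
          rcases le_or_gt x ce with hx | hx
          · exact ⟨(cs, ce), Or.inl rfl, h1, hx⟩
          · refine ⟨(s, e), Or.inr (Or.inl rfl), ?_, ?_⟩ <;> simp_all <;> omega
        · exact ⟨p, by simp [hp], h1, h2⟩
      · rintro ⟨p, hp, h1, h2⟩
        simp only [List.mem_cons] at hp
        rcases hp with hp | hp | hp
        · subst hp; exact ⟨(cs, max ce e), by simp, h1, le_trans h2 (le_max_left _ _)⟩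
        · subst hp
          exact ⟨(cs, max ce e), by simp, le_trans hcs h1, le_trans h2 (le_max_right _ _)⟩
        · exact ⟨p, by simp [hp], h1, h2⟩
    · rw [pvMergeRec, if_neg h]
      have := ih (s, e) hs.2
      simp only [List.mem_cons] at *
      constructor
      · rintro ⟨p, hp, h1, h2⟩
        rcases hp with hp | hp
        · exact ⟨p, Or.inl hp, h1, h2⟩
        · obtain ⟨p', hp', e1, e2⟩ := this.mp ⟨p, hp, h1, h2⟩
          exact ⟨p', Or.inr hp', e1, e2⟩
      · rintro ⟨p, hp, h1, h2⟩
        rcases hp with hp | hp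
        · exact ⟨p, Or.inl hp, h1, h2⟩
        · obtain ⟨p', hp', e1, e2⟩ := this.mpr ⟨p, hp, h1, h2⟩
          exact ⟨p', Or.inr hp', e1, e2⟩

-- merged intervals: starts nondecreasing and strictly separated
lemma pvMergeRec_pairwise :
    ∀ (rest : List (Int × Int)) (cur : Int × Int),
      (cur :: rest).Pairwise (fun a b => a.1 ≤ b.1) →
      (pvMergeRec cur rest).Pairwise (fun a b => a.1 ≤ b.1 ∧ a.2 < b.1) ∧
      ∀ q ∈ pvMergeRec cur rest, cur.1 ≤ q.1 := by
  intro rest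
  induction rest with
  | nil => intro cur _; simp [pvMergeRec]
  | cons q t ih =>
    intro cur hs
    obtain ⟨cs, ce⟩ := cur
    obtain ⟨s, e⟩ := q
    rw [List.pairwise_cons] at hs
    have hcs : cs ≤ s := hs.1 (s, e) (by simp)
    have hrest : ∀ r ∈ t, cs ≤ r.1 := fun r hr => hs.1 r (by simp [hr])
    have hqt := hs.2
    rw [List.pairwise_cons] at hqt
    by_cases h : s ≤ ce
    · have hps : ((cs, max ce e) :: t).Pairwise (fun a b : Int × Int => a.1 ≤ b.1) := by
        rw [List.pairwise_cons]
        exact ⟨fun r hr => hrest r hr, hqt.2⟩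
      rw [pvMergeRec, if_pos h]
      exact ih _ hps
    · rw [pvMergeRec, if_neg h]
      obtain ⟨hpw, hall⟩ := ih (s, e) hs.2
      refine ⟨?_, ?_⟩
      · rw [List.pairwise_cons]
        refine ⟨fun r hr => ⟨le_trans hcs (hall r hr), ?_⟩, hpw⟩
        have := hall r hr
        omega
      · intro r hr
        rcases List.mem_cons.mp hr with hr | hr
        · subst hr; exact le_refl _
        · exact le_trans hcs (hall r hr)

-- on a start-sorted list, "start ≤ x" holds exactly on a prefix of length countP
lemma countP_prefix (x : Int) :
    ∀ (m : List (Int × Int)), m.Pairwise (fun a b => a.1 ≤ b.1) →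
      ∀ j (hj : j < m.length),
        (m[j].1 ≤ x ↔ j < m.countP (fun p => decide (p.1 ≤ x))) := by
  intro m
  induction m with
  | nil => intro _ j hj; simp at hj
  | cons p t ih =>
    intro hs j hj
    rw [List.pairwise_cons] at hs
    by_cases h : p.1 ≤ x
    · rw [List.countP_cons]
      simp only [h, decide_true]
      match j with
      | 0 => simpa using by omega
      | j + 1 =>
        have hj' : j < t.length := by simpa using hj
        have := ih hs.2 j hj'
        simpa using by omega
    · have ht : t.countP (fun p => decide (p.1 ≤ x)) = 0 := by
        rw [List.countP_eq_zero]
        intro q hq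
        have := hs.1 q hq
        simp only [decide_eq_true_eq]
        omega
      rw [List.countP_cons]
      simp only [h, decide_false, ht]
      match j with
      | 0 => simpa using h
      | j + 1 =>
        have hj' : j < t.length := by simpa using hj
        have hq : ¬ t[j].1 ≤ x := by
          have := hs.1 t[j] (List.getElem_mem hj')
          omega
        simpa using by omega

-- the binary search computes countP (number of intervals whose start is ≤ x)
lemma pvBsearch_eq (m : List (Int × Int)) (x : Int)
    (hs : m.Pairwise (fun a b => a.1 ≤ b.1)) :
    ∀ (n lo hi : Nat), hi - lo = n →
      lo ≤ m.countP (fun p => decide (p.1 ≤ x)) →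
      m.countP (fun p => decide (p.1 ≤ x)) ≤ hi → hi ≤ m.length →
      pvBsearch m x lo hi = m.countP (fun p => decide (p.1 ≤ x)) := by
  intro n
  induction n using Nat.strong_induction_on with
  | _ n ih =>
    intro lo hi hn h1 h2 h3
    rw [pvBsearch]
    by_cases hlt : lo < hi
    · rw [dif_pos hlt]
      have hmid : (lo + hi) / 2 < m.length := by omega
      have hg : m.getD ((lo + hi) / 2) (0, 0) = m[(lo + hi) / 2] :=
        List.getD_eq_getElem _ _ hmid
      have hchar := countP_prefix x m hs ((lo + hi) / 2) hmid
      by_cases hc : (m.getD ((lo + hi) / 2) (0, 0)).1 ≤ x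
      · rw [if_pos hc]
        rw [hg] at hc
        have : (lo + hi) / 2 < m.countP (fun p => decide (p.1 ≤ x)) := hchar.mp hc
        exact ih (hi - ((lo + hi) / 2 + 1)) (by omega) _ _ rfl (by omega) h2 h3
      · rw [if_neg hc]
        rw [hg] at hc
        have : ¬ ((lo + hi) / 2 < m.countP (fun p => decide (p.1 ≤ x))) :=
          fun hlt' => hc (hchar.mpr hlt')
        exact ih ((lo + hi) / 2 - lo) (by omega) _ _ rfl h1 (by omega) (by omega)
    · rw [dif_neg hlt]
      omega

-- B's per-score test equals "x lies in some merged interval"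
lemma btest_iff (m : List (Int × Int)) (x : Int)
    (hQ : m.Pairwise (fun a b => a.1 ≤ b.1 ∧ a.2 < b.1)) :
    (0 < pvBsearch m x 0 m.length ∧
      x ≤ (m.getD (pvBsearch m x 0 m.length - 1) (0, 0)).2) ↔
    ∃ p ∈ m, p.1 ≤ x ∧ x ≤ p.2 := by
  have hs : m.Pairwise (fun a b => a.1 ≤ b.1) := hQ.imp (fun h => h.1)
  have hc : m.countP (fun p => decide (p.1 ≤ x)) ≤ m.length := List.countP_le_length
  have hb : pvBsearch m x 0 m.length = m.countP (fun p => decide (p.1 ≤ x)) :=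
    pvBsearch_eq m x hs _ 0 m.length rfl (Nat.zero_le _) hc (le_refl _)
  set c := m.countP (fun p => decide (p.1 ≤ x)) with hcdef
  rw [hb]
  constructor
  · rintro ⟨hpos, hle⟩
    have hlt : c - 1 < m.length := by omega
    have hg : m.getD (c - 1) (0, 0) = m[c - 1] := List.getD_eq_getElem _ _ hlt
    refine ⟨m[c - 1], List.getElem_mem hlt, ?_, by rwa [hg] at hle⟩
    exact (countP_prefix x m hs (c - 1) hlt).mpr (by omega)
  · rintro ⟨p, hp, h1, h2⟩
    obtain ⟨j, hj, rfl⟩ := List.mem_iff_getElem.mp hp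
    have hjc : j < c := (countP_prefix x m hs j hj).mp h1
    have hpos : 0 < c := by omega
    have hlt : c - 1 < m.length := by omega
    have hg : m.getD (c - 1) (0, 0) = m[c - 1] := List.getD_eq_getElem _ _ hlt
    refine ⟨hpos, ?_⟩
    rw [hg]
    rcases Nat.lt_or_ge j (c - 1) with hjlt | hjge
    · have hcx : m[c - 1].1 ≤ x := (countP_prefix x m hs (c - 1) hlt).mpr (by omega)
      have := (List.pairwise_iff_getElem.mp hQ) j (c - 1) hj hlt hjlt
      omega
    · have : j = c - 1 := by omega
      subst this
      exact h2

-- combined facts about the merged list built from the sorted ranges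
lemma merged_props (ranges : List (Int × Int)) :
    (pvMerge (PySem.List.sorted ranges (fun r => r.1) false)).Pairwise
      (fun a b => a.1 ≤ b.1 ∧ a.2 < b.1) ∧
    ∀ x : Int,
      ((∃ p ∈ pvMerge (PySem.List.sorted ranges (fun r => r.1) false), p.1 ≤ x ∧ x ≤ p.2) ↔
        ∃ p ∈ ranges, p.1 ≤ x ∧ x ≤ p.2) := by
  have hs := PySem.List.sorted_pairwise ranges (fun r => r.1)
  have hmem : ∀ p : Int × Int,
      p ∈ PySem.List.sorted ranges (fun r => r.1) false ↔ p ∈ ranges := by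
    intro p; simp [PySem.List.mem_sorted]
  cases hS : PySem.List.sorted ranges (fun r => r.1) false with
  | nil =>
    rw [hS] at hmem
    have hr : ranges = [] := by
      cases hranges : ranges with
      | nil => rfl
      | cons a l =>
        exact absurd ((hmem a).mpr (by rw [hranges]; simp)) (by simp)
    constructor
    · simp [pvMerge]
    · intro x
      rw [hr]
      simp [pvMerge]
  | cons p rs =>
    rw [hS] at hs hmem
    rw [pvMerge_cons]
    refine ⟨(pvMergeRec_pairwise rs p hs).1, fun x => ?_⟩
    rw [mem_pvMergeRec x rs p hs]
    constructor
    · rintro ⟨q, hq, h1, h2⟩; exact ⟨q, (hmem q).mp hq, h1, h2⟩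
    · rintro ⟨q, hq, h1, h2⟩; exact ⟨q, (hmem q).mpr hq, h1, h2⟩

-- per-score: A's linear scan agrees with B's binary-search test
lemma test_eq (ranges : List (Int × Int)) (x : Int) :
    (is_important x ranges = true) ↔
    (0 < pvBsearch (pvMerge (PySem.List.sorted ranges (fun r => r.1) false)) x 0
        (pvMerge (PySem.List.sorted ranges (fun r => r.1) false)).length ∧
      x ≤ ((pvMerge (PySem.List.sorted ranges (fun r => r.1) false)).getD
        (pvBsearch (pvMerge (PySem.List.sorted ranges (fun r => r.1) false)) x 0
          (pvMerge (PySem.List.sorted ranges (fun r => r.1) false)).length - 1) (0, 0)).2) := by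
  obtain ⟨hQ, hmem⟩ := merged_props ranges
  rw [is_important_iff, ← hmem x, ← btest_iff _ x hQ]

-- ===== VERDICT (by name: the statement is the Claim_ definition above) =====
theorem get_significant_nodes_count_spec : Claim_equal_get_significant_nodes_count := by
  intro scores_list importance_ranges _
  unfold Spec_get_significant_nodes_count
  unfold get_significant_nodes_count get_significant_nodes_count_alt
  apply PySem.List.foldl_congr_mem
  intro acc scores _
  congr 2
  apply PySem.List.foldl_congr_mem
  intro count x _
  by_cases h : is_important x importance_ranges = true
  · rw [if_pos h, if_pos ((test_eq importance_ranges x).mp h)]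
  · rw [if_neg (by simpa using h), if_neg (fun hc => h ((test_eq importance_ranges x).mpr hc))]
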